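-- pv_equiv track=rewrite | github.com/romiteld/ZohoDealCreation | app/langgraph_manager.py | _generate_correction_recommendations
-- ===== SOURCE A (Python) =====
-- from typing import Dict, Optional, Any, List, TypedDict, Annotated
--
-- def _generate_correction_recommendations(corrections: Dict[str, Any]) -> List[str]:
--     """Generate recommendations based on user corrections"""
--     recommendations = []
--
--     correction_types = {}
--     for field, correction_info in corrections.items():
--         change_type = correction_info.get('change_type', 'unknown')
--         if change_type not in correction_types:
--             correction_types[change_type] = []
--         correction_types[change_type].append(field)
--
--     # Generate specific recommendations
--     if 'added_missing' in correction_types: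
--         recommendations.append(f"Consider improving extraction prompts for: {', '.join(correction_types['added_missing'])}")
--
--     if 'value_change' in correction_types:
--         recommendations.append(f"Review extraction accuracy for: {', '.join(correction_types['value_change'])}")
--
--     if 'case_correction' in correction_types:
--         recommendations.append("Consider adding case normalization for name fields")
--
--     if len(corrections) > 3:
--         recommendations.append("High correction rate - consider domain-specific prompt tuning")
--
--     return recommendations
-- ===== SOURCE B (Python) =====
-- def _generate_correction_recommendations(corrections):
--     """Generate recommendations based on user corrections"""
--     recommendations = []
--
--     added = [f for f, info in corrections.items()
--              if info.get('change_type', 'unknown') == 'added_missing']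
--     if added:
--         recommendations.append("Consider improving extraction prompts for: " + ", ".join(added))
--
--     changed = [f for f, info in corrections.items()
--                if info.get('change_type', 'unknown') == 'value_change']
--     if changed:
--         recommendations.append("Review extraction accuracy for: " + ", ".join(changed))
--
--     if any(info.get('change_type', 'unknown') == 'case_correction'
--            for info in corrections.values()):
--         recommendations.append("Consider adding case normalization for name fields")
--
--     if len(corrections) > 3:
--         recommendations.append("High correction rate - consider domain-specific prompt tuning")
--
--     return recommendations
-- ===== Notes on version B (the rewrite author's own statement) =====
-- stated objective: simpler
-- what changed: Drops the intermediate change_type->fields grouping dict; each recommendation is computed directly by its own filtered comprehension (or an any() presence test) over corrections.items().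
import Mathlib
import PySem

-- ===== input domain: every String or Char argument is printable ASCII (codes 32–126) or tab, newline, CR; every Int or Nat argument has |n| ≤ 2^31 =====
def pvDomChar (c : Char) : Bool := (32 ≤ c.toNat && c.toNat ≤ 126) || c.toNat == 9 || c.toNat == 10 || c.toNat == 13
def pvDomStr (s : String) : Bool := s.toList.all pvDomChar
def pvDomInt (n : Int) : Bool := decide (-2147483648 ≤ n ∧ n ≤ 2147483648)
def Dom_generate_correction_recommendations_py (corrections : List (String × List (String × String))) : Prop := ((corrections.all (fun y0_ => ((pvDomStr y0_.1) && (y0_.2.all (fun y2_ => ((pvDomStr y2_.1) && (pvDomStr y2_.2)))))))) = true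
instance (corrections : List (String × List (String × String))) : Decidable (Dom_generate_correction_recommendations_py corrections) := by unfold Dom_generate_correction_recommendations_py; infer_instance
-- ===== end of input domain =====

-- B drops A's intermediate change_type->fields grouping dict: each recommendation is computed
-- directly from its own filtered pass over the items (objective: simpler decomposition).

-- ===== PORT A =====
-- correction_info.get('change_type', 'unknown') (first-match association-list lookup)
def pvChangeType (info : List (String × String)) : String :=
  ((PySem.Dict.mk info).get? "change_type").getD "unknown"

def generate_correction_recommendations_py (corrections : List (String × List (String × String))) : List String :=
  let correction_types : PySem.Dict String (List String) :=
    corrections.foldl (fun d p =>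
      let change_type := pvChangeType p.2
      let d := if d.contains change_type then d else d.insert change_type []
      d.modify change_type [] (fun l => l ++ [p.1])) PySem.Dict.empty
  let recommendations : List String := []
  let recommendations :=
    if correction_types.contains "added_missing" then
      recommendations ++ ["Consider improving extraction prompts for: " ++
        PySem.Str.join ", " (correction_types.getD "added_missing" [])]
    else recommendations
  let recommendations :=
    if correction_types.contains "value_change" then
      recommendations ++ ["Review extraction accuracy for: " ++
        PySem.Str.join ", " (correction_types.getD "value_change" [])]
    else recommendations
  let recommendations :=
    if correction_types.contains "case_correction" then
      recommendations ++ ["Consider adding case normalization for name fields"]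
    else recommendations
  let recommendations :=
    if corrections.length > 3 then
      recommendations ++ ["High correction rate - consider domain-specific prompt tuning"]
    else recommendations
  recommendations

-- ===== PORT B =====
def generate_correction_recommendations_py_alt (corrections : List (String × List (String × String))) : List String :=
  let recommendations : List String := []
  let added := (corrections.filter (fun p => pvChangeType p.2 == "added_missing")).map (·.1)
  let recommendations :=
    if added = [] then recommendations
    else recommendations ++ ["Consider improving extraction prompts for: " ++ PySem.Str.join ", " added]
  let changed := (corrections.filter (fun p => pvChangeType p.2 == "value_change")).map (·.1)
  let recommendations :=
    if changed = [] then recommendations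
    else recommendations ++ ["Review extraction accuracy for: " ++ PySem.Str.join ", " changed]
  let recommendations :=
    if corrections.any (fun p => pvChangeType p.2 == "case_correction") then
      recommendations ++ ["Consider adding case normalization for name fields"]
    else recommendations
  let recommendations :=
    if corrections.length > 3 then
      recommendations ++ ["High correction rate - consider domain-specific prompt tuning"]
    else recommendations
  recommendations



-- ===== PRECONDITION & SPEC =====
def Spec_generate_correction_recommendations_py (corrections : List (String × List (String × String))) (out : List String) : Prop := out = generate_correction_recommendations_py_alt corrections
instance (corrections : List (String × List (String × String))) (out : List String) : Decidable (Spec_generate_correction_recommendations_py corrections out) := by unfold Spec_generate_correction_recommendations_py; infer_instance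

-- ===== CLAIM (what is proved, stated in full; the proofs are below) =====
def Claim_equal_generate_correction_recommendations_py : Prop := ∀ (corrections : List (String × List (String × String))), Dom_generate_correction_recommendations_py corrections → Spec_generate_correction_recommendations_py corrections (generate_correction_recommendations_py corrections)

-- ===== LEMMAS AND PROOFS =====

-- One loop step of A equals a plain modify (the "if absent, insert []" is absorbed).
theorem pvStep_eq (d : PySem.Dict String (List String)) (t x : String) :
    (if d.contains t then d else d.insert t []).modify t [] (fun l => l ++ [x])
      = d.modify t [] (fun l => l ++ [x]) := by
  by_cases h : d.contains t = true
  · simp [h]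
  · simp only [Bool.not_eq_true] at h
    simp only [h, Bool.false_eq_true, if_false]
    rw [PySem.Dict.modify, PySem.Dict.modify, PySem.Dict.getD_insert_self,
        PySem.Dict.getD_of_not_contains (h := h), PySem.Dict.insert_insert_self]

theorem pvFold_eq (corrections : List (String × List (String × String))) :
    corrections.foldl (fun d p =>
      (if d.contains (pvChangeType p.2) then d else d.insert (pvChangeType p.2) []).modify
        (pvChangeType p.2) [] (fun l => l ++ [p.1])) PySem.Dict.empty
    = corrections.foldl (fun d p => d.modify (pvChangeType p.2) [] (fun l => l ++ [p.1]))
        PySem.Dict.empty := by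
  induction corrections using List.reverseRecOn with
  | nil => rfl
  | append_singleton l p ih =>
      simp only [List.foldl_append, List.foldl_cons, List.foldl_nil, ih]
      exact pvStep_eq _ (pvChangeType p.2) p.1

theorem pvFold_getD (corrections : List (String × List (String × String))) (c : String) :
    (corrections.foldl (fun d p => d.modify (pvChangeType p.2) [] (fun l => l ++ [p.1]))
        PySem.Dict.empty).getD c []
      = (corrections.filter (fun p => pvChangeType p.2 == c)).map (·.1) := by
  have h := PySem.Dict.getD_foldl_modify_append
      (corrections.map (fun p => (pvChangeType p.2, p.1))) PySem.Dict.empty c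
  rw [List.foldl_map] at h
  simpa [List.filter_map, Function.comp] using h

theorem pvFold_contains (corrections : List (String × List (String × String))) (c : String) :
    (corrections.foldl (fun d p => d.modify (pvChangeType p.2) [] (fun l => l ++ [p.1]))
        PySem.Dict.empty).contains c
      = corrections.any (fun p => pvChangeType p.2 == c) := by
  rw [PySem.Dict.contains_eq_decide_mem_keys, PySem.Dict.keys_foldl_modify_key]
  simp [pysem, List.any_eq]

theorem pvContains_iff_filter_ne (corrections : List (String × List (String × String))) (c : String) :
    corrections.any (fun p => pvChangeType p.2 == c)
      = !((corrections.filter (fun p => pvChangeType p.2 == c)).map (·.1)).isEmpty := by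
  rw [List.isEmpty_map, Bool.eq_iff_iff]
  constructor
  · intro h
    simp only [List.any_eq_true] at h
    obtain ⟨x, hx, hpx⟩ := h
    simp only [Bool.not_eq_eq_eq_not, Bool.not_true, List.isEmpty_eq_false_iff, ne_eq,
      List.filter_eq_nil_iff, not_forall]
    exact ⟨x, hx, by simpa using hpx⟩
  · intro h
    simp only [Bool.not_eq_eq_eq_not, Bool.not_true, List.isEmpty_eq_false_iff,
      ← List.length_pos_iff, List.length_filter_pos_iff] at h
    obtain ⟨x, hx, hpx⟩ := h
    simp only [List.any_eq_true]
    exact ⟨x, hx, hpx⟩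

-- ===== VERDICT (by name: the statement is the Claim_ definition above) =====
theorem generate_correction_recommendations_py_spec : Claim_equal_generate_correction_recommendations_py := by
  intro corrections _
  unfold Spec_generate_correction_recommendations_py
  simp only [generate_correction_recommendations_py, generate_correction_recommendations_py_alt,
    pvFold_eq, pvFold_getD, pvFold_contains, pvContains_iff_filter_ne]
  by_cases h1 : (corrections.filter (fun p => pvChangeType p.2 == "added_missing")) = [] <;>
  by_cases h2 : (corrections.filter (fun p => pvChangeType p.2 == "value_change")) = [] <;>
  by_cases h3 : (corrections.filter (fun p => pvChangeType p.2 == "case_correction")) = [] <;>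
    simp [h1, h2, h3, List.isEmpty_map, List.map_eq_nil_iff]
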